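-- pv_equiv track=rewrite | github.com/posl/comment_recommendation | script/mod_gen/5_time/zh/270_D/3.py | get_max_stone
-- ===== SOURCE A (Python) =====
-- def get_max_stone(n, k, a):
--     if n == 0:
--         return 0
--     # dp[i][j]表示从i移除j个棋子的最大值
--     dp = [[0 for i in range(n + 1)] for j in range(k + 1)]
--     for i in range(1, k + 1):
--         for j in range(1, n + 1):
--             if j >= a[i - 1]:
--                 dp[i][j] = max(dp[i - 1][j], dp[i - 1][j - a[i - 1]] + a[i - 1])
--             else:
--                 dp[i][j] = dp[i - 1][j]
--     return dp[k][n]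
-- ===== SOURCE B (Python) =====
-- def get_max_stone(n, k, a):
--     # no capacity: nothing can be removed
--     if n == 0:
--         return 0
--     # sparse set of achievable subset sums (capped at n) instead of a dense DP table
--     reachable = {0}
--     for i in range(k):
--         x = a[i]
--         reachable |= {s + x for s in reachable if s + x <= n}
--     return max(reachable)
-- ===== Notes on version B (the rewrite author's own statement) =====
-- stated objective: alternative
-- what changed: Replaces the dense (k+1)x(n+1) DP table with a sparse set of reachable subset sums, unioning in shifted sums per item and returning the set's maximum.
import Mathlib
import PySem

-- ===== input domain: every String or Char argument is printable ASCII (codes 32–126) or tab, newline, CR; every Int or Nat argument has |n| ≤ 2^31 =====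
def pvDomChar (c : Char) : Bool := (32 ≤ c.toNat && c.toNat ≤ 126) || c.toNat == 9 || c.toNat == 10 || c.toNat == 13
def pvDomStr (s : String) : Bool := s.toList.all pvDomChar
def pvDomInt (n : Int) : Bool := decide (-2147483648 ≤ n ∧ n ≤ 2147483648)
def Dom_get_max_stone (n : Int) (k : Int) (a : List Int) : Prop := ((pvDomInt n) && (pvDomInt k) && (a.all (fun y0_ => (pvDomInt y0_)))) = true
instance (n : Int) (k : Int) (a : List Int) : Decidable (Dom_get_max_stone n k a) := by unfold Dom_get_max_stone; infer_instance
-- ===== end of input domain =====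

-- B replaces A's dense (k+1)×(n+1) DP table with a sparse set of reachable subset sums (alternative algorithm, similar cost).


-- ===== PORT A =====
-- literal transliteration: dp table of rows, nested loops updating dp[i][j];
-- pyGetD/pySetD are exact under Pre_ (all indices in range there).
def get_max_stone (n : Int) (k : Int) (a : List Int) : Int :=
  if n = 0 then 0
  else
    let dp0 : List (List Int) :=
      (PySem.List.pyRange 0 (k + 1) 1).map
        (fun _ => (PySem.List.pyRange 0 (n + 1) 1).map (fun _ => (0 : Int)))
    let dp :=
      (PySem.List.pyRange 1 (k + 1) 1).foldl
        (fun dp i =>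
          (PySem.List.pyRange 1 (n + 1) 1).foldl
            (fun dp j =>
              let ai := PySem.List.pyGetD a (i - 1) 0
              let prev := PySem.List.pyGetD dp (i - 1) []
              let row := PySem.List.pyGetD dp i []
              if j ≥ ai then
                PySem.List.pySetD dp i
                  (PySem.List.pySetD row j
                    (max (PySem.List.pyGetD prev j 0) (PySem.List.pyGetD prev (j - ai) 0 + ai)))
              else
                PySem.List.pySetD dp i (PySem.List.pySetD row j (PySem.List.pyGetD prev j 0)))
            dp)
        dp0
    PySem.List.pyGetD (PySem.List.pyGetD dp k []) n 0

-- ===== PORT B =====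
-- literal transliteration of Source B: early return 0 for n == 0; otherwise reachable = {0};
-- for i in range(k): union in the capped shifted sums; return max(reachable).
def get_max_stone_alt (n : Int) (k : Int) (a : List Int) : Int :=
  if n = 0 then 0
  else
    let reach : PySem.Set Int :=
      (PySem.List.pyRange 0 k 1).foldl
        (fun r i =>
          let x := PySem.List.pyGetD a i 0
          PySem.Set.union r (r.filterMap (fun s => if s + x ≤ n then some (s + x) else none)))
        (PySem.Set.ofList [0])
    (PySem.List.max? reach (fun y => y)).getD 0

-- ===== PRECONDITION & SPEC =====
-- Pre_ excludes exactly the inputs on which A raises IndexError: n < 0; and, when n ≥ 1,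
-- k < 0 or k > len(a) (bad table/row indexing) or a negative value among the first k items
-- (dp[i-1][j - a[i-1]] indexes past the end of the row).
def Pre_get_max_stone (n : Int) (k : Int) (a : List Int) : Prop :=
  0 ≤ n ∧ (n = 0 ∨ (0 ≤ k ∧ k.toNat ≤ a.length ∧ ∀ x ∈ a.take k.toNat, 0 ≤ x))
instance (n : Int) (k : Int) (a : List Int) : Decidable (Pre_get_max_stone n k a) := by
  unfold Pre_get_max_stone; infer_instance
def pvWitness_get_max_stone : Int × Int × List Int := (5, 2, [2, 3])

def Spec_get_max_stone (n : Int) (k : Int) (a : List Int) (out : Int) : Prop := out = get_max_stone_alt n k a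
instance (n : Int) (k : Int) (a : List Int) (out : Int) : Decidable (Spec_get_max_stone n k a out) := by unfold Spec_get_max_stone; infer_instance

-- ===== CLAIM (what is proved, stated in full; the proofs are below) =====
def Claim_equal_get_max_stone : Prop := ∀ (n : Int) (k : Int) (a : List Int), Dom_get_max_stone n k a → Pre_get_max_stone n k a → Spec_get_max_stone n k a (get_max_stone n k a)

-- ===== LEMMAS AND PROOFS =====

def pvW (a : List Int) (m : Nat) : Int := a.getD m 0

def pvDpF (a : List Int) : Nat → Int → Int
  | 0, _ => 0
  | m+1, j => if pvW a m ≤ j then max (pvDpF a m j) (pvDpF a m (j - pvW a m) + pvW a m) else pvDpF a m j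

def pvStep (n : Int) (r : List Int) (x : Int) : List Int :=
  PySem.Set.union r (r.filterMap (fun s => if s + x ≤ n then some (s + x) else none))

def pvS (n : Int) (a : List Int) : Nat → List Int
  | 0 => [0]
  | m+1 => pvStep n (pvS n a m) (pvW a m)

def pvBest (l : List Int) (j : Int) : Int := (l.filter (fun s => decide (s ≤ j))).foldl max 0

theorem mem_pvStep {n x y : Int} {r : List Int} :
    y ∈ pvStep n r x ↔ y ∈ r ∨ ∃ t ∈ r, t + x ≤ n ∧ y = t + x := by
  simp [pvStep, PySem.Set.mem_union, List.mem_filterMap]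
  constructor
  · rintro (h | ⟨t, ht, he⟩)
    · exact Or.inl h
    · by_cases hc : t + x ≤ n
      · simp [hc] at he; exact Or.inr ⟨t, ht, hc, he.symm⟩
      · simp [hc] at he
  · rintro (h | ⟨t, ht, hc, he⟩)
    · exact Or.inl h
    · exact Or.inr ⟨t, ht, by simp [hc, he]⟩

theorem pvS_zero_mem (n : Int) (a : List Int) (m : Nat) : 0 ∈ pvS n a m := by
  induction m with
  | zero => simp [pvS]
  | succ m ih => exact mem_pvStep.2 (Or.inl ih)

theorem pvS_le {n : Int} (hn : 0 ≤ n) (a : List Int) (m : Nat) : ∀ y ∈ pvS n a m, y ≤ n := by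
  induction m with
  | zero => intro y hy; simp [pvS] at hy; omega
  | succ m ih =>
    intro y hy
    rcases mem_pvStep.1 hy with h | ⟨t, ht, hc, he⟩
    · exact ih y h
    · omega

theorem pvS_nonneg {n : Int} {a : List Int} {m : Nat} (hw : ∀ i < m, 0 ≤ pvW a i) :
    ∀ y ∈ pvS n a m, 0 ≤ y := by
  induction m with
  | zero => intro y hy; simp [pvS] at hy; omega
  | succ m ih =>
    intro y hy
    rcases mem_pvStep.1 hy with h | ⟨t, ht, hc, he⟩
    · exact ih (fun i hi => hw i (by omega)) y h
    · have := ih (fun i hi => hw i (by omega)) t ht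
      have := hw m (by omega)
      omega

theorem pvBest_nonneg (l : List Int) (j : Int) : 0 ≤ pvBest l j :=
  (PySem.List.le_foldl_max _ 0).1

theorem pvBest_ge {l : List Int} {j y : Int} (hy : y ∈ l) (hyj : y ≤ j) : y ≤ pvBest l j :=
  (PySem.List.le_foldl_max _ 0).2 y (List.mem_filter.2 ⟨hy, by simpa using hyj⟩)

theorem pvBest_cases (l : List Int) (j : Int) :
    pvBest l j = 0 ∨ (pvBest l j ∈ l ∧ pvBest l j ≤ j) := by
  rcases PySem.List.foldl_max_mem (l.filter (fun s => decide (s ≤ j))) 0 with h | h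
  · exact Or.inl h
  · have := List.mem_filter.1 h
    exact Or.inr ⟨this.1, by simpa using this.2⟩

theorem pvBest_step {n x j : Int} {r : List Int} (hjn : j ≤ n)
    (h0 : 0 ∈ r) (hnn : ∀ y ∈ r, 0 ≤ y) :
    pvBest (pvStep n r x) j = if x ≤ j then max (pvBest r j) (pvBest r (j - x) + x) else pvBest r j := by
  by_cases hxj : x ≤ j
  · simp only [if_pos hxj]
    apply le_antisymm
    · rcases pvBest_cases (pvStep n r x) j with h | ⟨hm, hle⟩
      · rw [h]; have := pvBest_nonneg r j; omega
      · rcases mem_pvStep.1 hm with h | ⟨t, ht, hc, he⟩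
        · have := pvBest_ge h hle; omega
        · have : t ≤ j - x := by omega
          have := pvBest_ge ht this
          omega
    · apply max_le
      · rcases pvBest_cases r j with h | ⟨hm, hle⟩
        · rw [h]; exact pvBest_nonneg _ _
        · exact pvBest_ge (mem_pvStep.2 (Or.inl hm)) hle
      · rcases pvBest_cases r (j - x) with h | ⟨hm, hle⟩
        · rw [h]
          have hx_mem : x ∈ pvStep n r x := (mem_pvStep (n := n) (x := x) (r := r)).2 (Or.inr ⟨0, h0, by omega, by omega⟩)
          have := pvBest_ge hx_mem hxj; omega
        · have h1 : pvBest r (j - x) + x ∈ pvStep n r x :=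
            (mem_pvStep (n := n) (x := x) (r := r)).2 (Or.inr ⟨pvBest r (j - x), hm, by omega, rfl⟩)
          have := pvBest_ge (j := j) h1 (by omega)
          omega
  · simp only [if_neg hxj]
    apply le_antisymm
    · rcases pvBest_cases (pvStep n r x) j with h | ⟨hm, hle⟩
      · rw [h]; exact pvBest_nonneg _ _
      · rcases mem_pvStep.1 hm with h | ⟨t, ht, hc, he⟩
        · exact pvBest_ge h hle
        · have := hnn t ht; omega
    · rcases pvBest_cases r j with h | ⟨hm, hle⟩
      · rw [h]; exact pvBest_nonneg _ _
      · exact pvBest_ge (mem_pvStep.2 (Or.inl hm)) hle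

theorem pvDpF_eq {n : Int} {a : List Int} {m : Nat}
    (hw : ∀ i < m, 0 ≤ pvW a i) : ∀ j : Int, 0 ≤ j → j ≤ n →
    pvDpF a m j = pvBest (pvS n a m) j := by
  induction m with
  | zero =>
    intro j hj0 hjn
    simp [pvDpF, pvS, pvBest, hj0]
  | succ m ih =>
    intro j hj0 hjn
    have hwm : 0 ≤ pvW a m := hw m (by omega)
    have hw' : ∀ i < m, 0 ≤ pvW a i := fun i hi => hw i (by omega)
    rw [show pvDpF a (m+1) j = if pvW a m ≤ j then max (pvDpF a m j) (pvDpF a m (j - pvW a m) + pvW a m) else pvDpF a m j from rfl]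
    rw [show pvS n a (m+1) = pvStep n (pvS n a m) (pvW a m) from rfl]
    rw [pvBest_step hjn (pvS_zero_mem n a m) (pvS_nonneg hw')]
    by_cases hc : pvW a m ≤ j
    · simp only [if_pos hc]
      rw [ih hw' j hj0 hjn, ih hw' (j - pvW a m) (by omega) (by omega)]
    · simp only [if_neg hc, ih hw' j hj0 hjn]

-- the max of a list containing 0 with all elements ≤ n is pvBest at n
theorem max_getD_eq_pvBest {n : Int} {l : List Int} (h0 : 0 ∈ l) (hle : ∀ y ∈ l, y ≤ n) :
    (PySem.List.max? l (fun y => y)).getD 0 = pvBest l n := by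
  have hne : l ≠ [] := by intro h; rw [h] at h0; simp at h0
  obtain ⟨m, hm⟩ : ∃ m, PySem.List.max? l (fun y => y) = some m := by
    rcases h : PySem.List.max? l (fun y => y) with _ | m
    · exact absurd ((PySem.List.max?_eq_none_iff l (fun y => y)).1 h) hne
    · exact ⟨m, rfl⟩
  rw [hm]
  have hmem := PySem.List.max?_mem hm
  have hmax := PySem.List.max?_isMax hm
  simp only [Option.getD_some]
  apply le_antisymm
  · exact pvBest_ge hmem (hle m hmem)
  · rcases pvBest_cases l n with h | ⟨hm', _⟩
    · rw [h]; exact hmax 0 h0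
    · exact hmax _ hm'

theorem pvS_eq_range_foldl (n : Int) (a : List Int) (K : Nat) :
    (List.range K).foldl (fun r i => pvStep n r (pvW a i)) [0] = pvS n a K := by
  induction K with
  | zero => rfl
  | succ K ih => rw [List.range_succ, List.foldl_append, ih]; rfl

theorem alt_eq_pvS {n k : Int} (a : List Int) (hn : n ≠ 0) :
    get_max_stone_alt n k a = (PySem.List.max? (pvS n a k.toNat) (fun y => y)).getD 0 := by
  by_cases hk : 0 ≤ k
  case neg =>
    have h1 : k.toNat = 0 := by omega
    unfold get_max_stone_alt
    rw [if_neg hn, PySem.List.pyRange_one_eq_nil (by omega), List.foldl_nil, h1]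
    rfl
  obtain ⟨K, rfl⟩ : ∃ K : Nat, k = (K : Int) := ⟨k.toNat, by omega⟩
  unfold get_max_stone_alt
  rw [if_neg hn, PySem.List.pyRange_zero_nat, List.foldl_map]
  simp only [Int.toNat_natCast]
  rw [show (PySem.Set.ofList [(0:Int)]) = [(0:Int)] from rfl]
  rw [show (fun (r : PySem.Set Int) (i : Nat) =>
        let x := PySem.List.pyGetD a (↑i) 0
        PySem.Set.union r (r.filterMap (fun s => if s + x ≤ n then some (s + x) else none)))
      = (fun (r : List Int) (i : Nat) => pvStep n r (pvW a i)) from by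
        funext r i; simp [pvStep, pvW, PySem.List.pyGetD_natCast]]
  rw [pvS_eq_range_foldl]

-- the inner-loop body of A's port, with the row index i fixed
def pvInner (a : List Int) (i : Int) (dp : List (List Int)) (j : Int) : List (List Int) :=
  let ai := PySem.List.pyGetD a (i - 1) 0
  let prev := PySem.List.pyGetD dp (i - 1) []
  let row := PySem.List.pyGetD dp i []
  if j ≥ ai then
    PySem.List.pySetD dp i
      (PySem.List.pySetD row j
        (max (PySem.List.pyGetD prev j 0) (PySem.List.pyGetD prev (j - ai) 0 + ai)))
  else
    PySem.List.pySetD dp i (PySem.List.pySetD row j (PySem.List.pyGetD prev j 0))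

def pvRow (a : List Int) (N i : Nat) : List Int := (List.range (N+1)).map (fun (j : Nat) => pvDpF a i (j : Int))
def pvZRow (N : Nat) : List Int := (List.range (N+1)).map (fun _ => (0:Int))
def pvTable (a : List Int) (N K m : Nat) : List (List Int) :=
  (List.range (K+1)).map (fun i => if i ≤ m then pvRow a N i else pvZRow N)
def pvPRow (a : List Int) (N m p : Nat) : List Int :=
  (List.range (N+1)).map (fun (j : Nat) => if 1 ≤ j ∧ j ≤ p then pvDpF a (m+1) (j : Int) else 0)

theorem pvDpF_zero {a : List Int} {m : Nat} (hw : ∀ i < m, 0 ≤ pvW a i) : pvDpF a m 0 = 0 := by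
  induction m with
  | zero => rfl
  | succ m ih =>
    have h0 := ih (fun i hi => hw i (by omega))
    have hm := hw m (by omega)
    show (if pvW a m ≤ 0 then _ else _) = 0
    by_cases h : pvW a m ≤ 0
    · have hw0 : pvW a m = 0 := by omega
      simp [h0, hw0]
    · simp [h, h0]

theorem pvPRow_zero (a : List Int) (N m : Nat) : pvPRow a N m 0 = pvZRow N := by
  apply List.ext_getElem (by simp [pvPRow, pvZRow])
  intro j h1 h2
  simp only [pvPRow, pvZRow, List.getElem_map, List.getElem_range]
  rw [if_neg (by omega : ¬ (1 ≤ j ∧ j ≤ 0))]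

theorem pvPRow_last {a : List Int} {N m : Nat} (hw : ∀ i < m + 1, 0 ≤ pvW a i) :
    pvPRow a N m N = pvRow a N (m+1) := by
  apply List.ext_getElem (by simp [pvPRow, pvRow])
  intro j h1 h2
  simp only [pvPRow, pvRow, List.getElem_map, List.getElem_range]
  simp only [pvPRow, List.length_map, List.length_range] at h1
  have hj : j < N + 1 := h1
  by_cases h1 : 1 ≤ j
  · rw [if_pos ⟨h1, by omega⟩]
  · have : j = 0 := by omega
    subst this
    rw [if_neg (by omega : ¬ (1 ≤ 0 ∧ 0 ≤ N)), Nat.cast_zero, pvDpF_zero hw]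

-- table with row m+1 partially overwritten
theorem pvTable_set_prow_zero (a : List Int) (N K m : Nat) :
    (pvTable a N K m).set (m+1) (pvPRow a N m 0) = pvTable a N K m := by
  rw [pvPRow_zero]
  apply List.ext_getElem (by simp [pvTable])
  intro i h1 h2
  rw [List.getElem_set]
  split_ifs with h
  · subst h
    simp only [pvTable, List.getElem_map, List.getElem_range]
    rw [if_neg (by omega)]
  · rfl

theorem pvTable_set_row_last {a : List Int} {N K m : Nat} (hw : ∀ i < m + 1, 0 ≤ pvW a i) :
    (pvTable a N K m).set (m+1) (pvPRow a N m N) = pvTable a N K (m+1) := by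
  rw [pvPRow_last hw]
  apply List.ext_getElem (by simp [pvTable])
  intro i h1 h2
  rw [List.getElem_set]
  simp only [pvTable, List.getElem_map, List.getElem_range]
  by_cases h : m + 1 = i
  · rw [if_pos h, if_pos (by omega)]
    subst h; rfl
  · rw [if_neg h]
    by_cases h4 : i ≤ m
    · rw [if_pos h4, if_pos (by omega)]
    · rw [if_neg h4, if_neg (by omega)]

theorem pvDpF_succ (a : List Int) (m : Nat) (j : Int) :
    pvDpF a (m+1) j = if pvW a m ≤ j then max (pvDpF a m j) (pvDpF a m (j - pvW a m) + pvW a m) else pvDpF a m j := rfl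

theorem pvPRow_set (a : List Int) (N m p : Nat) :
    (pvPRow a N m p).set (p+1) (pvDpF a (m+1) ((p:Int)+1)) = pvPRow a N m (p+1) := by
  apply List.ext_getElem (by simp [pvPRow])
  intro j h1 h2
  rw [List.getElem_set]
  simp only [pvPRow, List.getElem_map, List.getElem_range]
  by_cases h : p + 1 = j
  · rw [if_pos h, if_pos (by omega)]
    subst h
    push_cast
    rfl
  · rw [if_neg h]
    by_cases hj1 : 1 ≤ j ∧ j ≤ p
    · rw [if_pos hj1, if_pos (by omega)]
    · rw [if_neg hj1, if_neg (by omega)]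

theorem pvInner_step {a : List Int} {N K m p : Nat} (hmK : m < K) (hp : p < N)
    (hw : ∀ i < m + 1, 0 ≤ pvW a i) :
    pvInner a ((m : Int) + 1) ((pvTable a N K m).set (m+1) (pvPRow a N m p)) ((p : Int) + 1)
      = (pvTable a N K m).set (m+1) (pvPRow a N m (p+1)) := by
  have hlenT : ((pvTable a N K m).set (m+1) (pvPRow a N m p)).length = K + 1 := by
    simp [pvTable]
  have hwm : 0 ≤ pvW a m := hw m (by omega)
  -- the three lookups
  have hai : PySem.List.pyGetD a ((m : Int) + 1 - 1) 0 = pvW a m := by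
    rw [show (m : Int) + 1 - 1 = ((m : Nat) : Int) by omega, PySem.List.pyGetD_natCast]
    rfl
  have hprev : PySem.List.pyGetD ((pvTable a N K m).set (m+1) (pvPRow a N m p)) ((m : Int) + 1 - 1) []
      = pvRow a N m := by
    rw [show (m : Int) + 1 - 1 = ((m : Nat) : Int) by omega, PySem.List.pyGetD_natCast,
      List.getD_eq_getElem _ _ (by omega), List.getElem_set_ne (by omega)]
    simp only [pvTable, List.getElem_map, List.getElem_range]
    rw [if_pos (le_refl m)]
  have hrow : PySem.List.pyGetD ((pvTable a N K m).set (m+1) (pvPRow a N m p)) ((m : Int) + 1) []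
      = pvPRow a N m p := by
    rw [show (m : Int) + 1 = (((m + 1) : Nat) : Int) by push_cast; ring, PySem.List.pyGetD_natCast,
      List.getD_eq_getElem _ _ (by omega), List.getElem_set_self]
  have hget1 : PySem.List.pyGetD (pvRow a N m) ((p : Int) + 1) 0 = pvDpF a m ((p : Int) + 1) := by
    rw [show (p : Int) + 1 = (((p + 1) : Nat) : Int) by push_cast; ring, PySem.List.pyGetD_natCast,
      List.getD_eq_getElem _ _ (by simp [pvRow]; omega)]
    simp only [pvRow, List.getElem_map, List.getElem_range]
  simp only [pvInner, hai, hprev, hrow]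
  by_cases hg : (p : Int) + 1 ≥ pvW a m
  · rw [if_pos hg]
    have he0 : 0 ≤ (p : Int) + 1 - pvW a m := by omega
    have helt : (p : Int) + 1 - pvW a m < (((pvRow a N m).length : Nat) : Int) := by
      simp [pvRow]; omega
    have hget2 : PySem.List.pyGetD (pvRow a N m) ((p : Int) + 1 - pvW a m) 0
        = pvDpF a m ((p : Int) + 1 - pvW a m) := by
      rw [PySem.List.pyGetD_eq_getElem _ 0 he0 helt]
      simp only [pvRow, List.getElem_map, List.getElem_range]
      congr 1
      omega
    rw [hget1, hget2]
    rw [show max (pvDpF a m ((p : Int) + 1)) (pvDpF a m ((p : Int) + 1 - pvW a m) + pvW a m)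
        = pvDpF a (m+1) ((p : Int) + 1) by rw [pvDpF_succ, if_pos (by omega)]]
    rw [show ((m : Int) + 1) = (((m + 1) : Nat) : Int) by push_cast; ring,
      show ((p : Int) + 1) = (((p + 1) : Nat) : Int) by push_cast; ring,
      PySem.List.pySetD_natCast, PySem.List.pySetD_natCast, List.set_set]
    rw [show (pvDpF a (m+1) ((((p+1) : Nat)) : Int)) = pvDpF a (m+1) ((p : Int) + 1) by push_cast; ring_nf]
    rw [pvPRow_set a N m p]
  · rw [if_neg hg]
    rw [hget1]
    rw [show pvDpF a m ((p : Int) + 1) = pvDpF a (m+1) ((p : Int) + 1) by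
      rw [pvDpF_succ, if_neg (by omega)]]
    rw [show ((m : Int) + 1) = (((m + 1) : Nat) : Int) by push_cast; ring,
      show ((p : Int) + 1) = (((p + 1) : Nat) : Int) by push_cast; ring,
      PySem.List.pySetD_natCast, PySem.List.pySetD_natCast, List.set_set]
    rw [show (pvDpF a (m+1) ((((p+1) : Nat)) : Int)) = pvDpF a (m+1) ((p : Int) + 1) by push_cast; ring_nf]
    rw [pvPRow_set a N m p]

theorem pvInner_loop {a : List Int} {N K m : Nat} (hmK : m < K)
    (hw : ∀ i < m + 1, 0 ≤ pvW a i) :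
    (PySem.List.pyRange 1 ((N : Int) + 1) 1).foldl (pvInner a ((m : Int) + 1)) (pvTable a N K m)
      = pvTable a N K (m+1) := by
  have key : ∀ p : Nat, p ≤ N →
      (PySem.List.pyRange 1 ((p : Int) + 1) 1).foldl (pvInner a ((m : Int) + 1)) (pvTable a N K m)
        = (pvTable a N K m).set (m+1) (pvPRow a N m p) := by
    intro p
    induction p with
    | zero =>
      intro _
      rw [show ((0:Nat) : Int) + 1 = 1 by norm_num, PySem.List.pyRange_one_eq_nil (le_refl 1),
        List.foldl_nil, pvTable_set_prow_zero a N K m]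
    | succ p ih =>
      intro hp
      rw [show (((p+1:Nat)) : Int) + 1 = ((p : Int) + 1) + 1 by push_cast; ring,
        PySem.List.pyRange_one_succ_right (by omega), List.foldl_append, ih (by omega),
        List.foldl_cons, List.foldl_nil]
      exact pvInner_step hmK (by omega) hw
  rw [show ((N : Int) + 1) = ((N : Int)) + 1 from rfl]
  have := key N (le_refl N)
  rw [this, pvTable_set_row_last hw]

theorem pvOuter_loop {a : List Int} {N K : Nat}
    (hw : ∀ i < K, 0 ≤ pvW a i) : ∀ m, m ≤ K →
    (PySem.List.pyRange 1 ((m : Int) + 1) 1).foldl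
      (fun dp i => (PySem.List.pyRange 1 ((N : Int) + 1) 1).foldl (pvInner a i) dp)
      (pvTable a N K 0) = pvTable a N K m := by
  intro m
  induction m with
  | zero =>
    intro _
    rw [show ((0:Nat) : Int) + 1 = 1 by norm_num, PySem.List.pyRange_one_eq_nil (le_refl 1),
      List.foldl_nil]
  | succ m ih =>
    intro hm
    rw [show (((m+1:Nat)) : Int) + 1 = ((m : Int) + 1) + 1 by push_cast; ring,
      PySem.List.pyRange_one_succ_right (a := 1) (b := ((m : Int) + 1)) (by omega),
      List.foldl_append, ih (by omega), List.foldl_cons, List.foldl_nil]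
    exact pvInner_loop (by omega) (fun i hi => hw i (by omega))

theorem pvDp0_eq (a : List Int) (N K : Nat) :
    (PySem.List.pyRange 0 ((K : Int) + 1) 1).map
        (fun _ => (PySem.List.pyRange 0 ((N : Int) + 1) 1).map (fun _ => (0:Int)))
      = pvTable a N K 0 := by
  rw [show ((K : Int) + 1) = (((K+1 : Nat)) : Int) by push_cast; ring, PySem.List.pyRange_zero_nat,
    show ((N : Int) + 1) = (((N+1 : Nat)) : Int) by push_cast; ring, PySem.List.pyRange_zero_nat]
  apply List.ext_getElem (by simp [pvTable])
  intro i h1 h2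
  simp only [List.map_map, List.getElem_map, List.getElem_range, pvTable]
  by_cases h : i ≤ 0
  · have hi : i = 0 := by omega
    subst hi
    rw [if_pos (le_refl 0)]
    apply List.ext_getElem (by simp [pvRow, Function.comp_def])
    intro j j1 j2
    simp [pvRow, pvDpF, Function.comp_def]
  · rw [if_neg h]
    apply List.ext_getElem (by simp [pvZRow, Function.comp_def])
    intro j j1 j2
    simp [pvZRow, Function.comp_def]

theorem pvA_eq {N K : Nat} {a : List Int} (hN : 1 ≤ N)
    (hw : ∀ i < K, 0 ≤ pvW a i) :
    get_max_stone ((N : Int)) ((K : Int)) a = pvDpF a K ((N : Int)) := by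
  unfold get_max_stone
  rw [if_neg (by omega : ¬ ((N : Int)) = 0)]
  show PySem.List.pyGetD
      (PySem.List.pyGetD
        ((PySem.List.pyRange 1 ((K : Int) + 1) 1).foldl
          (fun dp i => (PySem.List.pyRange 1 ((N : Int) + 1) 1).foldl (pvInner a i) dp)
          ((PySem.List.pyRange 0 ((K : Int) + 1) 1).map
            (fun _ => (PySem.List.pyRange 0 ((N : Int) + 1) 1).map (fun _ => (0:Int)))))
        ((K : Int)) []) ((N : Int)) 0 = pvDpF a K ((N : Int))
  rw [pvDp0_eq a N K, pvOuter_loop hw K (le_refl K)]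
  have h1 : PySem.List.pyGetD (pvTable a N K K) ((K : Int)) [] = pvRow a N K := by
    rw [PySem.List.pyGetD_natCast,
      List.getD_eq_getElem _ _ (by simp only [pvTable, List.length_map, List.length_range]; omega)]
    simp only [pvTable, List.getElem_map, List.getElem_range, if_pos (le_refl K)]
  rw [h1, PySem.List.pyGetD_natCast,
    List.getD_eq_getElem _ _ (by simp only [pvRow, List.length_map, List.length_range]; omega)]
  simp only [pvRow, List.getElem_map, List.getElem_range]


-- ===== VERDICT (by name: the statement is the Claim_ definition above) =====
theorem get_max_stone_spec : Claim_equal_get_max_stone := by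
  intro n k a _ hpre
  obtain ⟨hn, hcase⟩ := hpre
  unfold Spec_get_max_stone
  by_cases h0 : n = 0
  · subst h0
    rw [show get_max_stone 0 k a = 0 by unfold get_max_stone; rw [if_pos rfl],
      show get_max_stone_alt 0 k a = 0 by unfold get_max_stone_alt; rw [if_pos rfl]]
  · obtain ⟨hk, hlen, hall⟩ : 0 ≤ k ∧ k.toNat ≤ a.length ∧ ∀ x ∈ a.take k.toNat, 0 ≤ x := by
      rcases hcase with h | h
      · omega
      · exact h
    rw [alt_eq_pvS a h0,
      max_getD_eq_pvBest (pvS_zero_mem n a k.toNat) (pvS_le hn a k.toNat)]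
    have hw : ∀ i < k.toNat, 0 ≤ pvW a i := by
      intro i hi
      have hi2 : i < (a.take k.toNat).length := by
        simp only [List.length_take]; omega
      have hmem : (a.take k.toNat)[i]'hi2 ∈ a.take k.toNat := List.getElem_mem hi2
      have heq : (a.take k.toNat)[i]'hi2 = a[i]'(by omega) := List.getElem_take
      rw [pvW, List.getD_eq_getElem _ _ (by omega), ← heq]
      exact hall _ hmem
    obtain ⟨K, rfl⟩ : ∃ K : Nat, k = (K : Int) := ⟨k.toNat, by omega⟩
    obtain ⟨N, rfl⟩ : ∃ N : Nat, n = (N : Int) := ⟨n.toNat, by omega⟩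
    simp only [Int.toNat_natCast] at hw ⊢
    rw [pvA_eq (by omega) hw]
    exact pvDpF_eq hw _ (by omega) (le_refl _)
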